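-- pv_equiv track=rewrite | github.com/nannannanhe/neetcode150 | arrays_and_hashing/08_valid_sudoku_02.py | isValidGroup
-- ===== SOURCE A (Python) =====
-- from typing import List
--
-- def isValidGroup(group: List[str]) -> bool:
--     seen = set()
--     for e in group:
--         if e == '.':
--             continue
--         if e in seen:
--             return False
--         seen.add(e)
--     return True
-- ===== SOURCE B (Python) =====
-- def isValidGroup(group):
--     vals = sorted(e for e in group if e != '.')
--     return all(a != b for a, b in zip(vals, vals[1:]))
-- ===== Notes on version B (the rewrite author's own statement) =====
-- stated objective: alternative
-- what changed: Replaced A's hash-set early-exit loop with sort-then-adjacent-scan: the non-dot entries are sorted and the result is whether no two adjacent sorted entries are equal (duplicates become neighbours after sorting).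
import Mathlib
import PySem

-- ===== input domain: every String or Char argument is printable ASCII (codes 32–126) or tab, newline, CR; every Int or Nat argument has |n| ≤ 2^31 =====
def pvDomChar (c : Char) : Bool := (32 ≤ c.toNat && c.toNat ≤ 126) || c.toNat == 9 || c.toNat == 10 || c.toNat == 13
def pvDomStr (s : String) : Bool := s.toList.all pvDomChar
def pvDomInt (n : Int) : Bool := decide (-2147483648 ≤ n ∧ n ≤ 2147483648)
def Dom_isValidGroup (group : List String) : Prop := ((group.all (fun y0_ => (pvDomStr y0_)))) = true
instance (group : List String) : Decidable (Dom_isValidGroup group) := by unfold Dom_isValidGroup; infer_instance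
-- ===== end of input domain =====

-- B replaces A's hash-set early-exit loop with sort-then-adjacent-scan over the non-dot
-- entries (duplicates become neighbours after sorting); objective: alternative algorithm.

-- ===== PORT A =====
-- A's loop over the group carrying the mutable 'seen' set, with early return False.
def isValidGroupGo (seen : PySem.Set String) : List String → Bool
  | [] => true
  | e :: rest =>
    if e == "." then isValidGroupGo seen rest
    else if PySem.Set.contains seen e then false
    else isValidGroupGo (PySem.Set.add seen e) rest

def isValidGroup (group : List String) : Bool :=
  isValidGroupGo PySem.Set.empty group

-- ===== PORT B =====
-- vals = sorted(e for e in group if e != '.'); all(a != b for a, b in zip(vals, vals[1:]))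
def isValidGroup_alt (group : List String) : Bool :=
  let vals := PySem.List.sorted (group.filter (fun e => e != ".")) (fun x => x) false
  (vals.zip vals.tail).all (fun p => p.1 != p.2)

-- ===== PRECONDITION & SPEC =====
def Spec_isValidGroup (group : List String) (out : Bool) : Prop := out = isValidGroup_alt group
instance (group : List String) (out : Bool) : Decidable (Spec_isValidGroup group out) := by unfold Spec_isValidGroup; infer_instance

-- ===== CLAIM (what is proved, stated in full; the proofs are below) =====
def Claim_equal_isValidGroup : Prop := ∀ (group : List String), Dom_isValidGroup group → Spec_isValidGroup group (isValidGroup group)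

-- ===== LEMMAS AND PROOFS =====

-- A's loop returns true iff the non-dot entries are duplicate-free and disjoint from 'seen'.
theorem isValidGroupGo_iff (l : List String) : ∀ (seen : PySem.Set String),
    isValidGroupGo seen l = true ↔
      ((l.filter (fun e => e != ".")).Nodup ∧ ∀ x ∈ l.filter (fun e => e != "."), x ∉ seen) := by
  induction l with
  | nil => intro seen; simp [isValidGroupGo]
  | cons e rest ih =>
    intro seen
    by_cases hdot : e = "."
    · simpa [isValidGroupGo, hdot] using ih seen
    · have hne : (e != ".") = true := by simp [hdot]
      have hfilter : List.filter (fun e => e != ".") (e :: rest)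
          = e :: List.filter (fun e => e != ".") rest := by
        simp [hne]
      by_cases hmem : e ∈ seen
      · rw [show isValidGroupGo seen (e :: rest) = false by simp [isValidGroupGo, hdot, hmem],
          hfilter]
        simp only [Bool.false_eq_true, false_iff, not_and]
        rintro - hall
        exact hall e (by simp) hmem
      · have h1 : isValidGroupGo seen (e :: rest) = isValidGroupGo (seen.add e) rest := by
          simp [isValidGroupGo, hdot, hmem]
        rw [h1, ih, hfilter]
        simp only [List.nodup_cons, List.mem_cons]
        constructor
        · rintro ⟨hnd, hall⟩
          have hnotin : e ∉ List.filter (fun e => e != ".") rest := fun hin =>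
            (hall e hin) ((PySem.Set.mem_add seen e e).2 (Or.inr rfl))
          refine ⟨⟨hnotin, hnd⟩, ?_⟩
          rintro x (rfl | hx)
          · exact hmem
          · intro hxs; exact hall x hx ((PySem.Set.mem_add seen e x).2 (Or.inl hxs))
        · rintro ⟨⟨hni, hnd⟩, hall⟩
          refine ⟨hnd, fun x hx hxadd => ?_⟩
          rcases (PySem.Set.mem_add seen e x).1 hxadd with hxs | rfl
          · exact hall x (Or.inr hx) hxs
          · exact hni hx

-- For a ≤-sorted list, no two adjacent entries equal ↔ no duplicates at all.
theorem adj_all_iff (l : List String) (h : l.Pairwise (· ≤ ·)) :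
    ((l.zip l.tail).all (fun p => p.1 != p.2)) = true ↔ l.Nodup := by
  induction l with
  | nil => simp
  | cons a t ih =>
    cases t with
    | nil => simp
    | cons b t =>
      have hpair := h
      rw [List.pairwise_cons] at hpair
      obtain ⟨hale, hbt⟩ := hpair
      have hab : a ≤ b := hale b (by simp)
      have hbt' := hbt
      rw [List.pairwise_cons] at hbt'
      obtain ⟨hble, _⟩ := hbt'
      have hstep := ih hbt
      simp only [List.tail_cons, List.zip_cons_cons, List.all_cons, Bool.and_eq_true,
        bne_iff_ne, ne_eq] at hstep ⊢
      constructor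
      · rintro ⟨hne, hrest⟩
        refine List.nodup_cons.2 ⟨?_, hstep.1 hrest⟩
        intro hmem
        rcases List.mem_cons.1 hmem with rfl | hat
        · exact hne rfl
        · have hba : b ≤ a := hble a hat
          exact hne (le_antisymm hab hba)
      · intro hnd
        have hnd' := List.nodup_cons.1 hnd
        refine ⟨fun heq => hnd'.1 (by simp [heq]), hstep.2 hnd'.2⟩

theorem isValidGroup_eq (group : List String) : isValidGroup group = isValidGroup_alt group := by
  have hA := isValidGroupGo_iff group PySem.Set.empty
  set vals := PySem.List.sorted (group.filter (fun e => e != ".")) (fun x => x) false with hv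
  have hperm : vals.Perm (group.filter (fun e => e != ".")) := PySem.List.sorted_perm _ _ _
  have hsorted : vals.Pairwise (· ≤ ·) := by
    simpa using PySem.List.sorted_pairwise (group.filter (fun e => e != ".")) (fun x => x)
  have hB : isValidGroup_alt group = true ↔ (group.filter (fun e => e != ".")).Nodup := by
    unfold isValidGroup_alt
    rw [← hv, adj_all_iff vals hsorted]
    exact hperm.nodup_iff
  have : isValidGroup group = true ↔ isValidGroup_alt group = true := by
    unfold isValidGroup
    rw [hA, hB]
    constructor
    · exact fun h => h.1
    · intro h; exact ⟨h, by intro x _ hx; simp [PySem.Set.empty] at hx⟩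
  exact Bool.eq_iff_iff.2 this

-- ===== VERDICT (by name: the statement is the Claim_ definition above) =====
theorem isValidGroup_spec : Claim_equal_isValidGroup := by
  intro group _
  exact isValidGroup_eq group
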